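-- pv_equiv track=rewrite | github.com/anissen/delta | create_snapshot_tests.py | split_into_sections_with_delimiters
-- ===== SOURCE A (Python) =====
-- def split_into_sections_with_delimiters(content):
--     """Split content into sections based on '# =======' separators, preserving delimiters."""
--     sections = []
--     lines = content.split('\n')
--     current_section = []
--     current_delimiter = None
--
--     for line in lines:
--         if line.strip() == '# =======':
--             if current_section:
--                 sections.append({
--                     'content': '\n'.join(current_section),
--                     'delimiter': current_delimiter
--                 })
--                 current_section = []
--             current_delimiter = line
--         else:
--             current_section.append(line)
--
--     # Add the last section if it exists
--     if current_section:
--         sections.append({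
--             'content': '\n'.join(current_section),
--             'delimiter': current_delimiter
--         })
--
--     return sections
-- ===== SOURCE B (Python) =====
-- def split_into_sections_with_delimiters(content):
--     """Split content into sections based on '# =======' separators, preserving delimiters.
--
--     Reverse single pass: walking the lines backwards, the first delimiter met above a content run is the LAST delimiter of its run, so no
--     accumulate-and-flush state machine is needed."""
--     sections = []
--     pending = []
--     for line in reversed(content.split('\n')):
--         if line.strip() == '# =======':
--             if pending:
--                 sections.insert(0, {'content': '\n'.join(pending), 'delimiter': line})
--                 pending = []
--         else:
--             pending.insert(0, line)
--     if pending: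
--         sections.insert(0, {'content': '\n'.join(pending), 'delimiter': None})
--     return sections
-- ===== Notes on version B (the rewrite author's own statement) =====
-- stated objective: alternative
-- what changed: Replaces A's forward accumulate-and-flush state machine (current_section buffer, current_delimiter, end-of-loop flush) with a single reverse pass: walking the lines backwards, the first delimiter met above a content run is necessarily the last of its delimiter run, so sections are emitted directly with no flush or delimiter-tracking state.
import Mathlib
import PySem

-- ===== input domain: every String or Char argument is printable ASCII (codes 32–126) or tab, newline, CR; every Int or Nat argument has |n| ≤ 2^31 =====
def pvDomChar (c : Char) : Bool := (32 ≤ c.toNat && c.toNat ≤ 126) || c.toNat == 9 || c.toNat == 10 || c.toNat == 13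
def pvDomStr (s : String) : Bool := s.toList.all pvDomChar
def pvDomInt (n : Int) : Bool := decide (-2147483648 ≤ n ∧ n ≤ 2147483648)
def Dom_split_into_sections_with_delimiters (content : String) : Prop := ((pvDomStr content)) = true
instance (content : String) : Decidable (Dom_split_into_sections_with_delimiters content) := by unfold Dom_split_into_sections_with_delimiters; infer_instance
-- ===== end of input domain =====

-- B replaces A's forward accumulate-and-flush state machine with a single reverse pass
-- (walking backwards, the first delimiter above a content run is the last of its run); same cost, simpler state.

-- ===== PORT A =====
-- the section dict {'content': '\n'.join(cur), 'delimiter': delim}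
def pvSecA (cur : List String) (delim : Option String) : List (String × Option String) :=
  [("content", some (PySem.Str.join "\n" cur)), ("delimiter", delim)]

-- body of A's for-loop: state = (sections, current_section, current_delimiter)
def pvStepA (st : List (List (String × Option String)) × List String × Option String) (line : String) :
    List (List (String × Option String)) × List String × Option String :=
  if PySem.Str.strip line = "# =======" then
    ((if st.2.1 = [] then st.1 else st.1 ++ [pvSecA st.2.1 st.2.2]), [], some line)
  else (st.1, st.2.1 ++ [line], st.2.2)

-- A's trailing "add the last section if it exists"
def pvFinA (st : List (List (String × Option String)) × List String × Option String) :
    List (List (String × Option String)) :=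
  if st.2.1 = [] then st.1 else st.1 ++ [pvSecA st.2.1 st.2.2]

def split_into_sections_with_delimiters (content : String) : List (List (String × Option String)) :=
  pvFinA (((PySem.Str.split? content "\n").getD []).foldl pvStepA ([], [], none))

-- ===== PORT B =====
-- body of B's loop over reversed(lines): state = (sections, pending)
def pvStepB (st : List (List (String × Option String)) × List String) (line : String) :
    List (List (String × Option String)) × List String :=
  if PySem.Str.strip line = "# =======" then
    ((if st.2 = [] then st.1 else pvSecA st.2 (some line) :: st.1), [])
  else (st.1, line :: st.2)

def split_into_sections_with_delimiters_alt (content : String) : List (List (String × Option String)) :=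
  let st := (((PySem.Str.split? content "\n").getD []).reverse).foldl pvStepB ([], [])
  if st.2 = [] then st.1 else pvSecA st.2 none :: st.1

-- ===== PRECONDITION & SPEC =====
def Spec_split_into_sections_with_delimiters (content : String) (out : List (List (String × Option String))) : Prop := out = split_into_sections_with_delimiters_alt content
instance (content : String) (out : List (List (String × Option String))) : Decidable (Spec_split_into_sections_with_delimiters content out) := by unfold Spec_split_into_sections_with_delimiters; infer_instance

-- ===== CLAIM (what is proved, stated in full; the proofs are below) =====
def Claim_equal_split_into_sections_with_delimiters : Prop := ∀ (content : String), Dom_split_into_sections_with_delimiters content → Spec_split_into_sections_with_delimiters content (split_into_sections_with_delimiters content)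

-- ===== LEMMAS AND PROOFS =====

-- B's state (sections, pending) finished in the context of A's carried (cur, delim):
-- cur ++ pending is the first section's content, delim its delimiter
def pvComb (cur : List String) (delim : Option String)
    (st : List (List (String × Option String)) × List String) : List (List (String × Option String)) :=
  if cur ++ st.2 = [] then st.1 else pvSecA (cur ++ st.2) delim :: st.1

theorem pvStepA_pos (st : List (List (String × Option String)) × List String × Option String)
    (line : String) (h : PySem.Str.strip line = "# =======") :
    pvStepA st line = ((if st.2.1 = [] then st.1 else st.1 ++ [pvSecA st.2.1 st.2.2]), [], some line) := by
  simp [pvStepA, h]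

theorem pvStepA_neg (st : List (List (String × Option String)) × List String × Option String)
    (line : String) (h : ¬ PySem.Str.strip line = "# =======") :
    pvStepA st line = (st.1, st.2.1 ++ [line], st.2.2) := by
  simp [pvStepA, h]

theorem pvStepB_pos (st : List (List (String × Option String)) × List String)
    (line : String) (h : PySem.Str.strip line = "# =======") :
    pvStepB st line = ((if st.2 = [] then st.1 else pvSecA st.2 (some line) :: st.1), []) := by
  simp [pvStepB, h]

theorem pvStepB_neg (st : List (List (String × Option String)) × List String)
    (line : String) (h : ¬ PySem.Str.strip line = "# =======") :
    pvStepB st line = (st.1, line :: st.2) := by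
  simp [pvStepB, h]

theorem pvMain (lines : List String) (secs : List (List (String × Option String)))
    (cur : List String) (delim : Option String) :
    pvFinA (lines.foldl pvStepA (secs, cur, delim)) =
      secs ++ pvComb cur delim (lines.foldr (fun l st => pvStepB st l) ([], [])) := by
  induction lines generalizing secs cur delim with
  | nil =>
    simp only [List.foldl_nil, List.foldr_nil, pvFinA, pvComb]
    cases cur <;> simp [pvSecA]
  | cons l ls ih =>
    rw [List.foldl_cons, List.foldr_cons]
    by_cases hd : PySem.Str.strip l = "# ======="
    · rw [pvStepA_pos _ _ hd, ih]
      show _ = secs ++ pvComb cur delim (pvStepB _ l)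
      rw [pvStepB_pos _ _ hd]
      cases cur
      · simp [pvComb]
      · simp only [pvComb]
        split <;> simp_all
    · rw [pvStepA_neg _ _ hd, ih]
      show _ = secs ++ pvComb cur delim (pvStepB _ l)
      rw [pvStepB_neg _ _ hd]
      simp [pvComb]

theorem split_eq (content : String) :
    split_into_sections_with_delimiters_alt content = split_into_sections_with_delimiters content := by
  unfold split_into_sections_with_delimiters split_into_sections_with_delimiters_alt
  rw [List.foldl_reverse, pvMain]
  simp [pvComb, pvSecA]

-- ===== VERDICT (by name: the statement is the Claim_ definition above) =====
theorem split_into_sections_with_delimiters_spec : Claim_equal_split_into_sections_with_delimiters := by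
  intro content _
  unfold Spec_split_into_sections_with_delimiters
  exact (split_eq content).symm
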